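-- pv_equiv track=rewrite | github.com/DKL1231/CodingTest | 프로그래머스/unrated/120882. 등수 매기기/등수 매기기.py | solution
-- ===== SOURCE A (Python) =====
-- def solution(score):
--     new_score = []
--     for i, [e, m] in enumerate(score):
--         new_score.append([e+m, i])
--     new_score.sort(reverse=True)
--     new_list = []
--     rank = 1
--     tmp = 1
--     for i, [s, idx] in enumerate(new_score):
--         new_list.append([rank, idx])
--         if i+1 < len(new_score) and new_score[i+1][0]==s:
--             tmp += 1
--         else:
--             rank += tmp
--             tmp = 1
--     answer = [rank for rank, idx in sorted(new_list, key=lambda x: x[1])]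
--     return answer
-- ===== SOURCE B (Python) =====
-- def solution(score):
--     totals = [e + m for e, m in score]
--     return [1 + sum(1 for t in totals if t > x) for x in totals]
-- ===== Notes on version B (the rewrite author's own statement) =====
-- stated objective: simpler
-- what changed: Replaces the sort + run-length rank scan + re-sort-by-index with a direct quadratic count: each rank is one plus the number of strictly greater totals.
import Mathlib
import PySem

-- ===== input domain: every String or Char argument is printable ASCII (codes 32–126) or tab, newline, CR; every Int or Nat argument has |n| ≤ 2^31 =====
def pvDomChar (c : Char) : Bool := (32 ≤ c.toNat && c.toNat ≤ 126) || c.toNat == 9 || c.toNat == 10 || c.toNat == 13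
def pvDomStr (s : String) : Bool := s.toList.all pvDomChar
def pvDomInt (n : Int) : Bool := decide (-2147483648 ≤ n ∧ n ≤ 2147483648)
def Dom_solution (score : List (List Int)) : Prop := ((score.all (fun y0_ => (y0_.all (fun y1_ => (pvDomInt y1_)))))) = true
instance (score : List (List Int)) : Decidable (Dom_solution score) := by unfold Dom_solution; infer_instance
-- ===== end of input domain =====

-- B replaces A's sort + run-length rank scan + re-sort-by-index with a direct count:
-- each rank is one plus the number of strictly greater totals (simpler, not faster).

-- Python's 'for e, m in …' unpacking; on a list whose length is not 2 Python raises
-- (excluded by Pre_solution), the port returns a junk 0 there.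
def pvSumPair (l : List Int) : Int :=
  match l with
  | [e, m] => e + m
  | _ => 0

-- ===== PORT A =====
-- new_list holds (rank, idx) pairs where Python holds two-element lists [rank, idx];
-- the sort key x[1] is the pair's second component. The unpacking 'for i, [s, idx]'
-- is read with pyGetD 0/1 (exact on the two-element lists the loop builds).
-- the body of A's second loop (new_score is the sorted list the loop reads ahead into)
def pvStepA (new_score : List (List Int)) (st : List (Int × Int) × Int × Int)
    (p : Int × List Int) : List (Int × Int) × Int × Int :=
  let s := PySem.List.pyGetD p.2 0 0
  let idx := PySem.List.pyGetD p.2 1 0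
  let new_list := st.1 ++ [(st.2.1, idx)]
  if p.1 + 1 < (new_score.length : Int) ∧
      PySem.List.pyGetD (PySem.List.pyGetD new_score (p.1 + 1) []) 0 0 = s then
    (new_list, st.2.1, st.2.2 + 1)
  else
    (new_list, st.2.1 + st.2.2, 1)

def solution (score : List (List Int)) : List Int :=
  let new_score : List (List Int) :=
    (PySem.List.enumerate score).foldl (fun acc p => acc ++ [[pvSumPair p.2, p.1]]) []
  let new_score := PySem.List.sorted new_score (fun x => x) true
  let st := (PySem.List.enumerate new_score).foldl (pvStepA new_score) ([], 1, 1)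
  (PySem.List.sorted st.1 (fun x => x.2) false).map (fun x => x.1)

-- ===== PORT B =====
-- 'sum(1 for t in totals if t > x)' is the count of strictly greater totals: countP.
def solution_alt (score : List (List Int)) : List Int :=
  let totals := score.map pvSumPair
  totals.map (fun x => 1 + (totals.countP (fun t => decide (x < t)) : Int))

-- ===== PRECONDITION & SPEC =====
-- Pre_ excludes inner lists whose length is not 2, on which BOTH Pythons raise
-- (ValueError from the 'e, m' / '[e, m]' unpacking).
def Pre_solution (score : List (List Int)) : Prop := ∀ l ∈ score, l.length = 2
instance (score : List (List Int)) : Decidable (Pre_solution score) := by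
  unfold Pre_solution; infer_instance
def pvWitness_solution : List (List Int) := [[1, 2], [3, 4], [2, 2]]

def Spec_solution (score : List (List Int)) (out : List Int) : Prop := out = solution_alt score
instance (score : List (List Int)) (out : List Int) : Decidable (Spec_solution score out) := by
  unfold Spec_solution; infer_instance

-- ===== CLAIM (what is proved, stated in full; the proofs are below) =====
def Claim_equal_solution : Prop :=
  ∀ (score : List (List Int)), Dom_solution score → Pre_solution score →
    Spec_solution score (solution score)

-- ===== LEMMAS AND PROOFS =====

-- first / second component of the two-element lists the A-side loop manipulates
def pvG (l : List Int) : Int := PySem.List.pyGetD l 0 0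
def pvH (l : List Int) : Int := PySem.List.pyGetD l 1 0

-- the rank/tmp scan of A, as a structural recursion with explicit lookahead
def pvScan : List (List Int) → Int → Int → List (Int × Int)
  | [], _, _ => []
  | [x], r, _ => [(r, pvH x)]
  | x :: y :: ys, r, t =>
    (r, pvH x) ::
      (if pvG y = pvG x then pvScan (y :: ys) r (t + 1) else pvScan (y :: ys) (r + t) 1)

-- the pre-sort list [[e+m, i], …]
def pvPairs (score : List (List Int)) : List (List Int) :=
  (PySem.List.enumerate score).map (fun p : Int × List Int => [pvSumPair p.2, p.1])

lemma pvPairs_build (score : List (List Int)) :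
    (PySem.List.enumerate score).foldl (fun acc p => acc ++ [[pvSumPair p.2, p.1]]) []
      = pvPairs score := by
  simpa [pvPairs] using
    PySem.List.foldl_append_singleton_eq_map
      (fun p : Int × List Int => [pvSumPair p.2, p.1]) (PySem.List.enumerate score)

-- lexicographic ≤ on two-element Int lists gives ≤ on the first components
lemma pvLex2 (s i s' i' : Int) (h : ([s', i'] : List Int) ≤ [s, i]) : s' ≤ s := by
  by_contra hc
  exact absurd h (not_le.mpr (List.Lex.rel (not_le.mp hc)))

-- the A-side fold over enumerate equals pvScan (lookahead via indexing = head of the rest)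
lemma pvFold_eq_scan (full : List (List Int)) :
    ∀ (suf : List (List Int)) (k : Nat) (acc : List (Int × Int)) (r t : Int),
      full.drop k = suf →
      ((PySem.List.enumerate suf (k : Int)).foldl (pvStepA full) (acc, r, t)).1
        = acc ++ pvScan suf r t := by
  intro suf
  induction suf with
  | nil => intro k acc r t _; simp [PySem.List.enumerate_nil, pvScan]
  | cons x xs ih =>
    intro k acc r t hdrop
    have hk : k < full.length := by
      by_contra hc
      rw [List.drop_eq_nil_of_le (Nat.le_of_not_lt hc)] at hdrop
      exact List.cons_ne_nil x xs hdrop.symm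
    have hlen : (x :: xs).length = full.length - k := by
      rw [← hdrop, List.length_drop]
    rw [PySem.List.enumerate_cons, List.foldl_cons]
    have hcast : (k : Int) + 1 = ((k + 1 : Nat) : Int) := by push_cast; ring
    cases xs with
    | nil =>
      have hnotlt : ¬ ((k : Int) + 1 < (full.length : Int)) := by
        simp only [List.length_cons, List.length_nil] at hlen
        omega
      have hstep : pvStepA full (acc, r, t) ((k : Int), x)
          = (acc ++ [(r, pvH x)], r + t, 1) := by
        simp [pvStepA, pvH, hnotlt]
      rw [hstep, hcast, ih (k + 1) (acc ++ [(r, pvH x)]) (r + t) 1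
        (by rw [← List.drop_drop, hdrop]; rfl)]
      simp [pvScan]
    | cons y ys =>
      have hlt : ((k : Int) + 1 < (full.length : Int)) := by
        simp only [List.length_cons] at hlen
        omega
      have hget : PySem.List.pyGetD full ((k : Int) + 1) [] = y := by
        rw [hcast, PySem.List.pyGetD_natCast]
        have h1 : full[k + 1]? = some y := by
          have h2 : (full.drop k)[1]? = full[k + 1]? := List.getElem?_drop
          rw [hdrop] at h2
          simpa using h2.symm
        simp [List.getD, h1]
      have hdrop' : full.drop (k + 1) = y :: ys := by
        rw [← List.drop_drop, hdrop]
        rfl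
      by_cases hxy : pvG y = pvG x
      · have hstep : pvStepA full (acc, r, t) ((k : Int), x)
            = (acc ++ [(r, pvH x)], r, t + 1) := by
          simp only [pvStepA, hget]
          rw [if_pos ⟨hlt, hxy⟩]
          simp [pvH]
        rw [hstep, hcast, ih (k + 1) (acc ++ [(r, pvH x)]) r (t + 1) hdrop']
        rw [pvScan, if_pos hxy]
        simp [pvH]
      · have hstep : pvStepA full (acc, r, t) ((k : Int), x)
            = (acc ++ [(r, pvH x)], r + t, 1) := by
          simp only [pvStepA, hget]
          rw [if_neg (by intro hc; exact hxy hc.2)]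
          simp [pvH]
        rw [hstep, hcast, ih (k + 1) (acc ++ [(r, pvH x)]) (r + t) 1 hdrop']
        rw [pvScan, if_neg hxy]
        simp [pvH]

-- characterisation of the scan on a descending list
lemma pvScan_char (ns : List (List Int)) :
    ∀ (x : List Int) (r t : Int),
      (x :: ns).Pairwise (fun a b => pvG b ≤ pvG a) →
      pvScan (x :: ns) r t =
        (x :: ns).map (fun l =>
          (r + (if pvG l = pvG x then 0
                else (t - 1) + ((x :: ns).countP (fun q => decide (pvG l < pvG q)) : Int)),
           pvH l)) := by
  induction ns with
  | nil => intro x r t _; simp [pvScan]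
  | cons y ys ih =>
    intro x r t h
    rw [List.pairwise_cons] at h
    obtain ⟨hx, htail⟩ := h
    have hyx : pvG y ≤ pvG x := hx y (by simp)
    have hy : ∀ b ∈ ys, pvG b ≤ pvG y := (List.pairwise_cons.mp htail).1
    by_cases hxy : pvG y = pvG x
    · rw [pvScan, if_pos hxy, ih y r (t + 1) htail]
      simp only [List.map_cons]
      refine congrArg₂ _ (by simp) (congrArg₂ _ ?_ (List.map_congr_left ?_))
      · simp [hxy]
      intro l hl
      by_cases hlx : pvG l = pvG x
      · simp [hlx, hxy]
      · have hly : ¬ pvG l = pvG y := by rw [hxy]; exact hlx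
        have hlt : pvG l < pvG x := lt_of_le_of_ne (hx l (List.mem_cons_of_mem _ hl)) hlx
        have hcnt : (x :: y :: ys).countP (fun q => decide (pvG l < pvG q))
            = (y :: ys).countP (fun q => decide (pvG l < pvG q)) + 1 := by
          rw [List.countP_cons]; simp [hlt]
        simp only [if_neg hlx, if_neg hly, hcnt, Prod.mk.injEq]
        exact ⟨by push_cast; ring, trivial⟩
    · rw [pvScan, if_neg hxy, ih y (r + t) 1 htail]
      have hylt : pvG y < pvG x := lt_of_le_of_ne hyx hxy
      simp only [List.map_cons]
      refine congrArg₂ _ (by simp) (congrArg₂ _ ?_ (List.map_congr_left ?_))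
      · have hcnt0 : (y :: ys).countP (fun q => decide (pvG y < pvG q)) = 0 := by
          rw [List.countP_eq_zero]
          intro q hq
          rcases List.mem_cons.mp hq with h' | h'
          · simp [h']
          · simpa using not_lt.mpr (hy q h')
        have hcnt : (x :: y :: ys).countP (fun q => decide (pvG y < pvG q)) = 1 := by
          rw [List.countP_cons, hcnt0]; simp [hylt]
        simp only [if_neg hxy, hcnt, Prod.mk.injEq]
        exact ⟨by push_cast; ring, trivial⟩
      intro l hl
      have hlley : pvG l ≤ pvG y := hy l hl
      have hllx : pvG l < pvG x := lt_of_le_of_lt hlley hylt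
      have hlnx : ¬ pvG l = pvG x := ne_of_lt hllx
      have hcnt : (x :: y :: ys).countP (fun q => decide (pvG l < pvG q))
          = (y :: ys).countP (fun q => decide (pvG l < pvG q)) + 1 := by
        rw [List.countP_cons]; simp [hllx]
      by_cases hly : pvG l = pvG y
      · have hcnt0 : (y :: ys).countP (fun q => decide (pvG l < pvG q)) = 0 := by
          rw [List.countP_eq_zero]
          intro q hq
          rcases List.mem_cons.mp hq with h' | h'
          · simp [h', hly]
          · simpa [hly] using not_lt.mpr (hy q h')
        simp only [if_pos hly, if_neg hlnx, hcnt, hcnt0, Prod.mk.injEq]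
        exact ⟨by push_cast; ring, trivial⟩
      · simp only [if_neg hly, if_neg hlnx, hcnt, Prod.mk.injEq]
        exact ⟨by push_cast; ring, trivial⟩

lemma pvScan_ranks (P : List (List Int)) (h : P.Pairwise (fun a b => pvG b ≤ pvG a)) :
    pvScan P 1 1 =
      P.map (fun l => (1 + (P.countP (fun q => decide (pvG l < pvG q)) : Int), pvH l)) := by
  cases P with
  | nil => simp [pvScan]
  | cons x xs =>
    rw [pvScan_char xs x 1 1 h]
    refine List.map_congr_left ?_
    intro l hl
    by_cases hlx : pvG l = pvG x
    · have hx : ∀ b ∈ xs, pvG b ≤ pvG x := (List.pairwise_cons.mp h).1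
      have hcnt0 : (x :: xs).countP (fun q => decide (pvG l < pvG q)) = 0 := by
        rw [List.countP_eq_zero]
        intro q hq
        rcases List.mem_cons.mp hq with h' | h'
        · simp [h', hlx]
        · simpa [hlx] using not_lt.mpr (hx q h')
      rw [if_pos hlx, hcnt0]
      simp
    · simp only [if_neg hlx, Prod.mk.injEq]
      exact ⟨by push_cast; ring, trivial⟩

-- the sort in the port elaborates with List.instLT/decidableLT; the order lemmas use the
-- (propositionally equal) LinearOrder instances
lemma pvSorted_inst (xs : List (List Int)) (key : List Int → List Int) (rev : Bool) :
    @PySem.List.sorted (List Int) (List Int) List.instLT (fun a b => a.decidableLT b) xs key rev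
    = @PySem.List.sorted (List Int) (List Int) List.instLinearOrder.toLT
        LinearOrder.toDecidableLT xs key rev := by
  congr

lemma pvG_pair (a b : Int) : pvG [a, b] = a := by
  simp [pvG, PySem.List.pyGetD_zero_cons]

lemma pvH_pair (a b : Int) : pvH [a, b] = b := by
  simp [pvH, PySem.List.pyGetD]

-- ===== VERDICT (by name: the statement is the Claim_ definition above) =====
theorem solution_spec : Claim_equal_solution := by
  intro score _hdom _hpre
  show solution score = solution_alt score
  simp only [solution, solution_alt, pvPairs_build]
  rw [pvSorted_inst]
  set P := @PySem.List.sorted (List Int) (List Int) List.instLinearOrder.toLT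
      LinearOrder.toDecidableLT (pvPairs score) (fun x => x) true with hPdef
  have hperm : P.Perm (pvPairs score) := by
    rw [hPdef]
    exact @PySem.List.sorted_perm (List Int) (List Int) List.instLinearOrder.toLT
      LinearOrder.toDecidableLT (pvPairs score) (fun x => x) true
  have hshape : ∀ l ∈ P, ∃ a b : Int, l = [a, b] := by
    intro l hl
    obtain ⟨p, _, rfl⟩ := List.mem_map.mp (hperm.mem_iff.mp hl)
    exact ⟨_, _, rfl⟩
  have hdesc : P.Pairwise (fun a b => pvG b ≤ pvG a) := by
    have h0 : P.Pairwise (fun a b => b ≤ a) := by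
      rw [hPdef]; exact PySem.List.sorted_pairwise_rev (pvPairs score) (fun x => x)
    refine h0.imp_of_mem ?_
    intro a b ha hb hab
    obtain ⟨s, i, rfl⟩ := hshape a ha
    obtain ⟨s', i', rfl⟩ := hshape b hb
    simpa [pvG_pair] using pvLex2 s i s' i' hab
  have hfold := pvFold_eq_scan P P 0 [] 1 1 rfl
  simp only [Nat.cast_zero] at hfold
  rw [hfold, List.nil_append, pvScan_ranks P hdesc]
  have hcnt : ∀ z : Int,
      P.countP (fun q => decide (z < pvG q))
        = (score.map pvSumPair).countP (fun u => decide (z < u)) := by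
    intro z
    rw [hperm.countP_eq, pvPairs, List.countP_map, List.countP_map]
    conv_rhs => rw [← PySem.List.map_snd_enumerate score 0, List.countP_map]
    refine List.countP_congr ?_
    intro p _
    simp [Function.comp, pvG_pair]
  have hsorted : PySem.List.sorted
      (P.map (fun l => (1 + (P.countP (fun q => decide (pvG l < pvG q)) : Int), pvH l)))
      (fun x => x.2) false
      = (pvPairs score).map
          (fun l => (1 + (P.countP (fun q => decide (pvG l < pvG q)) : Int), pvH l)) := by
    apply PySem.List.sorted_eq_of_perm_of_pairwise_lt
    · exact (hperm.map _).symm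
    · rw [List.pairwise_map, pvPairs, List.pairwise_map]
      refine List.Pairwise.imp ?_ (PySem.List.pairwise_lt_enumerate (xs := score) (s := 0))
      intro p q hpq
      simpa [pvH_pair] using hpq
  rw [hsorted, List.map_map, pvPairs, List.map_map]
  conv_rhs => rw [← PySem.List.map_snd_enumerate score 0, List.map_map, List.map_map]
  refine List.map_congr_left ?_
  intro p _
  simp [Function.comp, pvG_pair, hcnt]
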